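-- pv_equiv track=rewrite | github.com/woo427/Algorithm | 프로그래머스/2/84512. 모음 사전/모음 사전.py | solution
-- ===== SOURCE A (Python) =====
-- def solution(word):
--     words = 'AEIOU'
--     dic = []
--
--     def dfs(cnt, w):
--         if cnt == 6:
--             return
--         for i in range(len(words)):
--             dic.append(w + words[i])
--             dfs(cnt+1, w + words[i])
--
--     dfs(1, '')
--     return dic.index(word) + 1
-- ===== SOURCE B (Python) =====
-- def solution(word):
--     weights = [781, 156, 31, 6, 1]
--     return sum('AEIOU'.index(c) * w + 1 for c, w in zip(word, weights))
-- ===== Notes on version B (the rewrite author's own statement) =====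
-- stated objective: faster
-- what changed: Replaces the DFS that materialises all 3905 vowel words plus a linear list.index scan with a closed-form positional-weight rank formula (weights 781,156,31,6,1), one term per letter.
import Mathlib
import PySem

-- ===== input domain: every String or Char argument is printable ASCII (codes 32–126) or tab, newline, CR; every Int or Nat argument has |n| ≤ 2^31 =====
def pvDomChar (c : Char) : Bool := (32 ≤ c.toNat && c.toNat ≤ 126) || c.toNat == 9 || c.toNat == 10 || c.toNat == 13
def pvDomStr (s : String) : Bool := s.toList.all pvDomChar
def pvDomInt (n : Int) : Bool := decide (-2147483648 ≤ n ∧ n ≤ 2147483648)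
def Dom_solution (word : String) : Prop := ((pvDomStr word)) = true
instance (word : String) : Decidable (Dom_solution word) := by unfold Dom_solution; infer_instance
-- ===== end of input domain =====

-- B replaces A's DFS materialisation of all 3905 vowel words (and the linear dic.index scan)
-- with a closed-form positional-weight rank formula; objective: faster.


-- ===== PORT A =====
def pvVowels : List Char := ['A', 'E', 'I', 'O', 'U']

-- Python's nested dfs mutates the list 'dic'; ported as returning the list of words it appends,
-- in append order.  '6 ≤ cnt' (vs Python's 'cnt == 6') is a pure totality guard: dfs is only
-- ever called with cnt ∈ 1..6, where the two tests coincide.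
def dfsA (cnt : Nat) (w : List Char) : List (List Char) :=
  if 6 ≤ cnt then []
  else pvVowels.flatMap (fun c => (w ++ [c]) :: dfsA (cnt + 1) (w ++ [c]))
termination_by 6 - cnt

def solution (word : String) : Int :=
  let dic := dfsA 1 []
  -- dic.index(word) raises ValueError when word is absent; Pre_solution excludes exactly that,
  -- so the .getD 0 default is never reached under Pre_solution.
  (((PySem.List.index? dic word.toList).getD 0 : Nat) : Int) + 1

-- ===== PORT B =====
def pvWeights : List Int := [781, 156, 31, 6, 1]

-- sum(...) over the zip generator, left to right; 'AEIOU'.index(c) raises ValueError on a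
-- non-vowel, excluded by Pre_solution (the .getD 0 default is never reached under it).
def sumB : List (Char × Int) → Int
  | [] => 0
  | (c, wt) :: rest => (((PySem.List.index? pvVowels c).getD 0 : Nat) : Int) * wt + 1 + sumB rest

def solution_alt (word : String) : Int := sumB (word.toList.zip pvWeights)

-- ===== PRECONDITION & SPEC =====
-- Pre_ excludes exactly the inputs on which A's dic.index raises ValueError: the empty word,
-- words longer than 5 letters, and words with a character outside 'AEIOU'.
def Pre_solution (word : String) : Prop :=
  word.toList ≠ [] ∧ word.toList.length ≤ 5 ∧ word.toList.all (fun c => pvVowels.contains c) = true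
instance (word : String) : Decidable (Pre_solution word) := by unfold Pre_solution; infer_instance
def pvWitness_solution : String := "AEIOU"

def Spec_solution (word : String) (out : Int) : Prop := out = solution_alt word
instance (word : String) (out : Int) : Decidable (Spec_solution word out) := by unfold Spec_solution; infer_instance

-- ===== CLAIM (what is proved, stated in full; the proofs are below) =====
def Claim_equal_solution : Prop := ∀ (word : String), Dom_solution word → Pre_solution word → Spec_solution word (solution word)

-- ===== LEMMAS AND PROOFS =====

-- proof-side helpers
def dfsLen (cnt : Nat) : Nat :=
  if 6 ≤ cnt then 0 else 5 * (1 + dfsLen (cnt + 1))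
termination_by 6 - cnt

def idxV (c : Char) : Nat := (PySem.List.index? pvVowels c).getD 0

def rankF : Nat → List Char → Nat
  | _, [] => 0
  | cnt, c :: rest => idxV c * (1 + dfsLen (cnt + 1)) + (if rest = [] then 0 else 1 + rankF (cnt + 1) rest)

theorem len_dfsA (cnt : Nat) (w : List Char) : (dfsA cnt w).length = dfsLen cnt := by
  unfold dfsA dfsLen
  split
  · simp
  · simp [pvVowels, len_dfsA (cnt + 1)]
    omega
termination_by 6 - cnt

theorem mem_dfsA (cnt : Nat) (w x : List Char) (hx : x ∈ dfsA cnt w) :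
    ∃ c t, x = w ++ c :: t := by
  rw [dfsA] at hx
  split at hx
  · simp at hx
  · simp only [List.mem_flatMap, List.mem_cons] at hx
    obtain ⟨c, _, hc⟩ := hx
    rcases hc with h | h
    · exact ⟨c, [], by simpa using h⟩
    · obtain ⟨c', t, ht⟩ := mem_dfsA (cnt + 1) (w ++ [c]) x h
      exact ⟨c, c' :: t, by simpa [List.append_assoc] using ht⟩
termination_by 6 - cnt

theorem idx_append_nm {α : Type} [BEq α] [LawfulBEq α] (l l' : List α) (v : α) (h : v ∉ l) :
    PySem.List.index? (l ++ l') v = (PySem.List.index? l' v).map (· + l.length) := by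
  induction l with
  | nil => simp
  | cons x xs ih =>
    have hx : x ≠ v := fun he => h (he ▸ List.mem_cons_self)
    rw [List.cons_append, PySem.List.index?_cons_of_ne _ hx,
        ih (fun hm => h (List.mem_cons_of_mem _ hm))]
    cases PySem.List.index? l' v
    · simp
    · simp; omega

theorem target_not_mem_block (cnt : Nat) (w rest : List Char) (c c' : Char) (hne : c' ≠ c) :
    w ++ c :: rest ∉ (w ++ [c']) :: dfsA (cnt + 1) (w ++ [c']) := by
  intro h
  rcases List.mem_cons.mp h with heq | hmem
  · have : c :: rest = [c'] := List.append_cancel_left heq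
    exact hne (List.cons.injEq .. ▸ this).1.symm
  · obtain ⟨c'', t, ht⟩ := mem_dfsA (cnt + 1) (w ++ [c']) _ hmem
    rw [List.append_assoc] at ht
    have : c :: rest = c' :: c'' :: t := List.append_cancel_left ht
    exact hne ((List.cons.injEq ..).mp this).1.symm

theorem scan (cnt : Nat) (w : List Char) (c : Char) (rest : List Char) (m : Nat)
    (hblock : PySem.List.index? ((w ++ [c]) :: dfsA (cnt + 1) (w ++ [c])) (w ++ c :: rest) = some m) :
    ∀ vs : List Char, c ∈ vs →
      PySem.List.index? (vs.flatMap (fun c' => (w ++ [c']) :: dfsA (cnt + 1) (w ++ [c']))) (w ++ c :: rest)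
        = some ((PySem.List.index? vs c).getD 0 * (1 + dfsLen (cnt + 1)) + m) := by
  intro vs
  induction vs with
  | nil => intro h; simp at h
  | cons v vs' ih =>
    intro hc
    rw [List.flatMap_cons]
    by_cases hv : v = c
    · subst hv
      have hmem : w ++ v :: rest ∈ (w ++ [v]) :: dfsA (cnt + 1) (w ++ [v]) := by
        have := PySem.List.index?_isSome_iff ((w ++ [v]) :: dfsA (cnt + 1) (w ++ [v])) (w ++ v :: rest)
        exact this.mp (by rw [hblock]; rfl)
      rw [PySem.List.index?_append_of_mem _ hmem, hblock,
          PySem.List.index?_cons_self]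
      simp
    · have hnm := target_not_mem_block cnt w rest c v hv
      rw [idx_append_nm _ _ _ hnm, ih (List.mem_of_ne_of_mem (fun he => hv he.symm) hc)]
      have hc' : c ∈ vs' := List.mem_of_ne_of_mem (fun he => hv he.symm) hc
      obtain ⟨k, hk⟩ := Option.isSome_iff_exists.mp
        ((PySem.List.index?_isSome_iff vs' c).mpr hc')
      rw [PySem.List.index?_cons_of_ne _ hv, hk]
      simp only [Option.map_some, Option.getD_some, List.length_cons,
        len_dfsA (cnt + 1) (w ++ [v])]
      ring_nf

theorem main_idx : ∀ (rest : List Char) (cnt : Nat) (w : List Char),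
    rest ≠ [] → (∀ c ∈ rest, c ∈ pvVowels) → rest.length + cnt ≤ 6 →
    PySem.List.index? (dfsA cnt w) (w ++ rest) = some (rankF cnt rest) := by
  intro rest
  induction rest with
  | nil => intro _ _ h; exact absurd rfl h
  | cons c rest' ih =>
    intro cnt w _ hall hlen
    rw [dfsA, if_neg (by simp at hlen; omega)]
    have hblock : PySem.List.index? ((w ++ [c]) :: dfsA (cnt + 1) (w ++ [c])) (w ++ c :: rest')
        = some (if rest' = [] then 0 else 1 + rankF (cnt + 1) rest') := by
      by_cases hr : rest' = []
      · subst hr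
        have : w ++ c :: ([] : List Char) = w ++ [c] := rfl
        rw [this, PySem.List.index?_cons_self]
        simp
      · have hne : w ++ [c] ≠ w ++ c :: rest' := by
          intro he
          have : ([c] : List Char) = c :: rest' := List.append_cancel_left he
          exact hr ((List.cons.injEq ..).mp this).2.symm
        have hIH := ih (cnt + 1) (w ++ [c]) hr
          (fun cc hcc => hall cc (List.mem_cons_of_mem _ hcc))
          (by simp at hlen ⊢; omega)
        rw [List.append_assoc] at hIH
        simp only [List.singleton_append] at hIH
        rw [PySem.List.index?_cons_of_ne _ hne, hIH]
        simp [if_neg hr, Nat.add_comm]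
    have := scan cnt w c rest' _ hblock pvVowels (hall c List.mem_cons_self)
    rw [this]
    simp only [rankF, idxV]

theorem weights_drop (cnt : Nat) (h1 : 1 ≤ cnt) (h5 : cnt ≤ 5) :
    pvWeights.drop (cnt - 1) = (((1 + dfsLen (cnt + 1) : Nat) : Int)) :: pvWeights.drop cnt := by
  interval_cases cnt <;> simp [pvWeights, dfsLen]

theorem bridge : ∀ (rest : List Char) (cnt : Nat), rest ≠ [] → 1 ≤ cnt →
    rest.length + cnt ≤ 6 →
    sumB (rest.zip (pvWeights.drop (cnt - 1))) = (rankF cnt rest : Int) + 1 := by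
  intro rest
  induction rest with
  | nil => intro _ h; exact absurd rfl h
  | cons c rest' ih =>
    intro cnt _ h1 hlen
    rw [weights_drop cnt h1 (by simp at hlen; omega), List.zip_cons_cons]
    by_cases hr : rest' = []
    · subst hr
      simp [sumB, rankF, idxV]
    · have hIH := ih (cnt + 1) hr (by omega) (by simp at hlen ⊢; omega)
      have : cnt + 1 - 1 = cnt := by omega
      rw [this] at hIH
      simp only [sumB, hIH, rankF, if_neg hr, idxV]
      push_cast
      ring

-- ===== VERDICT (by name: the statement is the Claim_ definition above) =====
theorem solution_spec : Claim_equal_solution := by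
  intro word _ hpre
  obtain ⟨hne, hlen, hallb⟩ := hpre
  have hall : ∀ c ∈ word.toList, c ∈ pvVowels := by
    intro c hc
    simpa using (List.all_eq_true.mp hallb) c hc
  unfold Spec_solution solution solution_alt
  have hmain := main_idx word.toList 1 [] hne hall (by omega)
  simp only [List.nil_append] at hmain
  show (((PySem.List.index? (dfsA 1 []) word.toList).getD 0 : Nat) : Int) + 1
      = sumB (word.toList.zip pvWeights)
  rw [hmain]
  have hb := bridge word.toList 1 hne (by omega) (by omega)
  simp only [Nat.sub_self, List.drop_zero] at hb
  rw [hb]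
  simp
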